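-- pv_equiv track=rewrite | github.com/Dasyure/feedback-formatting | formatter.py | populate_marks_comments_individual
-- ===== SOURCE A (Python) =====
-- def populate_marks_comments_individual(row, results_template):
--     keys = [key for key in results_template.keys()]
--     max_index = len(keys) * 2 - 1
--     curr_category = keys[0]
--     curr_section = 'mark'
--     category_counter = 0
--     for i, item in enumerate(row):
--         curr_section = 'mark' if i % 2 == 0 else 'comments'
--         results_template[curr_category][curr_section] = item
--         # If index is odd, change categories
--         if i % 2 != 0 and i < max_index:
--             category_counter += 1
--             curr_category = keys[category_counter]
--         if i == max_index:
--             break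
--     return results_template
-- ===== SOURCE B (Python) =====
-- def populate_marks_comments_individual(row, results_template):
--     n = len(row)
--     for j, cat in enumerate(list(results_template.keys())):
--         if 2 * j < n:
--             results_template[cat]['mark'] = row[2 * j]
--         if 2 * j + 1 < n:
--             results_template[cat]['comments'] = row[2 * j + 1]
--     return results_template
-- ===== Notes on version B (the rewrite author's own statement) =====
-- stated objective: simpler
-- what changed: B loops over the template's categories and picks row elements by arithmetic positions (2j, 2j+1) guarded by len(row), replacing A's row-driven state machine with curr_category/category_counter, parity-switching section variable and explicit break at max_index.
import Mathlib
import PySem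

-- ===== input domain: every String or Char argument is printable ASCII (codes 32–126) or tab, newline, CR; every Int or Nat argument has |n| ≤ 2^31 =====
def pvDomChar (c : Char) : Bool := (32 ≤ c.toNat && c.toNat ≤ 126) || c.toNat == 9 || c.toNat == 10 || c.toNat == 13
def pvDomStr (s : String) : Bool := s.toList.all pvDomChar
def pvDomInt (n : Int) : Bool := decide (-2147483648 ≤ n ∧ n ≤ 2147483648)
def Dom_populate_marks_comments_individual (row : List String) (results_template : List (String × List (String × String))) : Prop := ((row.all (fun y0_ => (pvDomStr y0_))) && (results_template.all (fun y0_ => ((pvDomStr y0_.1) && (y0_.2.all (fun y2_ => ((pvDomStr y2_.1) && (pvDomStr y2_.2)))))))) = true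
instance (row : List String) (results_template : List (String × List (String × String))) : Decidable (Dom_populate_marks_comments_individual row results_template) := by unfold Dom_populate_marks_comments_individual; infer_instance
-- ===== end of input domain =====

-- B fills the template by looping over the categories with arithmetic index positions (2j, 2j+1)
-- instead of A's row-driven state machine (curr_category / category_counter / break); objective: simpler.
-- Both Pythons mutate results_template in place identically; the theorems are about the returned value.

-- Shared dict-assignment primitive: `d[k] = v` on an inner dict (overwrite first match in place, else append).
def dsetIn : List (String × String) → String → String → List (String × String)
  | [], k, v => [(k, v)]
  | (k', v') :: rest, k, v =>
    if k' == k then (k', v) :: rest else (k', v') :: dsetIn rest k v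

-- `t[cat][sec] = item` on the outer association list (cat is always one of t's keys when called).
def dset : List (String × List (String × String)) → String → String → String → List (String × List (String × String))
  | [], _, _, _ => []
  | (c, d) :: rest, cat, sec, item =>
    if c == cat then (c, dsetIn d sec item) :: rest else (c, d) :: dset rest cat sec item

-- ===== PORT A =====
-- A's loop: i runs over enumerate(row); per item write mark/comments by parity of i,
-- step curr_category when i is odd and i < max_index, break at i == max_index.
def aLoop (ks : List String) (maxIdx : Nat) : Nat → List String → Nat → String → List (String × List (String × String)) → List (String × List (String × String))
  | _, [], _, _, tpl => tpl
  | i, item :: rest, cnt, cat, tpl =>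
    let sec := if i % 2 == 0 then "mark" else "comments"
    let tpl' := dset tpl cat sec item
    let st := if i % 2 ≠ 0 ∧ i < maxIdx then (cnt + 1, ks.getD (cnt + 1) "") else (cnt, cat)
    if i = maxIdx then tpl' else aLoop ks maxIdx (i + 1) rest st.1 st.2 tpl'

def populate_marks_comments_individual (row : List String) (results_template : List (String × List (String × String))) : List (String × List (String × String)) :=
  let ks := results_template.map (·.1)
  match ks with
  | [] => results_template  -- Python raises IndexError at keys[0]; excluded by Pre_
  | k0 :: _ => aLoop ks (2 * ks.length - 1) 0 row 0 k0 results_template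

-- ===== PORT B =====
def bLoop (row : List String) : List String → Nat → List (String × List (String × String)) → List (String × List (String × String))
  | [], _, tpl => tpl
  | cat :: ks, j, tpl =>
    let tpl1 := if 2 * j < row.length then dset tpl cat "mark" (row.getD (2 * j) "") else tpl
    let tpl2 := if 2 * j + 1 < row.length then dset tpl1 cat "comments" (row.getD (2 * j + 1) "") else tpl1
    bLoop row ks (j + 1) tpl2

def populate_marks_comments_individual_alt (row : List String) (results_template : List (String × List (String × String))) : List (String × List (String × String)) :=
  bLoop row (results_template.map (·.1)) 0 results_template

-- ===== PRECONDITION & SPEC =====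
-- Pre_ excludes only the empty template, on which A raises IndexError (keys[0]) even for an empty row.
def Pre_populate_marks_comments_individual (row : List String) (results_template : List (String × List (String × String))) : Prop :=
  results_template ≠ []
instance (row : List String) (results_template : List (String × List (String × String))) : Decidable (Pre_populate_marks_comments_individual row results_template) := by unfold Pre_populate_marks_comments_individual; infer_instance

def pvWitness_populate_marks_comments_individual : List String × (List (String × List (String × String))) :=
  (["5", "good"], [("style", [("mark", ""), ("comments", "")])])

def Spec_populate_marks_comments_individual (row : List String) (results_template : List (String × List (String × String))) (out : List (String × List (String × String))) : Prop := out = populate_marks_comments_individual_alt row results_template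
instance (row : List String) (results_template : List (String × List (String × String))) (out : List (String × List (String × String))) : Decidable (Spec_populate_marks_comments_individual row results_template out) := by unfold Spec_populate_marks_comments_individual; infer_instance

-- ===== CLAIM (what is proved, stated in full; the proofs are below) =====
def Claim_equal_populate_marks_comments_individual : Prop := ∀ (row : List String) (results_template : List (String × List (String × String))), Dom_populate_marks_comments_individual row results_template → Pre_populate_marks_comments_individual row results_template → Spec_populate_marks_comments_individual row results_template (populate_marks_comments_individual row results_template)

-- ===== LEMMAS AND PROOFS =====

-- B's loop does nothing once 2*j is past the end of row.
lemma bLoop_noop (row : List String) : ∀ (ks : List String) (j : Nat) (tpl : List (String × List (String × String))),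
    row.length ≤ 2 * j → bLoop row ks j tpl = tpl := by
  intro ks
  induction ks with
  | nil => intro j tpl _; rfl
  | cons cat ks ih =>
    intro j tpl h
    simp only [bLoop, if_neg (by omega : ¬ 2 * j < row.length),
      if_neg (by omega : ¬ 2 * j + 1 < row.length)]
    exact ih (j + 1) tpl (by omega)

-- One-step unfoldings of A's loop.
lemma aLoop_even (ks : List String) (maxIdx i : Nat) (item : String) (rest : List String) (cnt : Nat) (cat : String) (tpl : List (String × List (String × String))) (h : i % 2 = 0) (hne : i ≠ maxIdx) :
    aLoop ks maxIdx i (item :: rest) cnt cat tpl = aLoop ks maxIdx (i + 1) rest cnt cat (dset tpl cat "mark" item) := by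
  rw [aLoop]; simp [h, hne]

lemma aLoop_odd_break (ks : List String) (maxIdx i : Nat) (item : String) (rest : List String) (cnt : Nat) (cat : String) (tpl : List (String × List (String × String))) (h : i % 2 = 1) (heq : i = maxIdx) :
    aLoop ks maxIdx i (item :: rest) cnt cat tpl = dset tpl cat "comments" item := by
  subst heq; rw [aLoop]; simp [h]

lemma aLoop_odd_step (ks : List String) (maxIdx i : Nat) (item : String) (rest : List String) (cnt : Nat) (cat : String) (tpl : List (String × List (String × String))) (h : i % 2 = 1) (hlt : i < maxIdx) :
    aLoop ks maxIdx i (item :: rest) cnt cat tpl = aLoop ks maxIdx (i + 1) rest (cnt + 1) (ks.getD (cnt + 1) "") (dset tpl cat "comments" item) := by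
  rw [aLoop]; simp [h, Nat.ne_of_lt hlt, hlt]

-- Invariant: at an even position 2*c with current category ks[c], A's state machine
-- agrees with B's per-category loop over the remaining categories.
lemma main_inv (ks row : List String) : ∀ (d c : Nat) (tpl : List (String × List (String × String))),
    ks.length - c = d → c < ks.length →
    aLoop ks (2 * ks.length - 1) (2 * c) (row.drop (2 * c)) c (ks.getD c "") tpl
      = bLoop row (ks.drop c) c tpl := by
  intro d
  induction d with
  | zero => intro c tpl hd hc; omega
  | succ d ih =>
    intro c tpl hd hc
    have hks : ks.drop c = ks.getD c "" :: ks.drop (c + 1) := by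
      rw [List.getD_eq_getElem?_getD, List.getElem?_eq_getElem hc]
      exact List.drop_eq_getElem_cons hc
    cases hrow : row.drop (2 * c) with
    | nil =>
      have hlen : row.length ≤ 2 * c := by
        have := List.drop_eq_nil_iff.mp hrow; omega
      rw [bLoop_noop row _ c tpl hlen]; rfl
    | cons x rest1 =>
      have hx : row.getD (2 * c) "" = x := by
        have : (row.drop (2 * c)).getD 0 "" = x := by rw [hrow]; rfl
        simpa [List.getD_eq_getElem?_getD, List.getElem?_drop] using this
      have hlen1 : 2 * c < row.length := by
        have := congrArg List.length hrow
        simp [List.length_drop] at this; omega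
      -- one step of A at even index 2*c (2*c is even, and never equals the odd max_index)
      rw [aLoop_even ks _ _ x rest1 c _ tpl (by omega) (by omega)]
      cases hrest : rest1 with
      | nil =>
        have hlen2 : row.length = 2 * c + 1 := by
          have := congrArg List.length hrow
          simp [List.length_drop, hrest] at this; omega
        rw [aLoop]
        rw [hks, bLoop]
        simp only [if_pos hlen1, hx, if_neg (by omega : ¬ 2 * c + 1 < row.length)]
        rw [bLoop_noop row _ (c + 1) _ (by omega)]
      | cons y rest2 =>
        have hy : row.getD (2 * c + 1) "" = y := by
          have : (row.drop (2 * c)).getD 1 "" = y := by rw [hrow, hrest]; rfl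
          simpa [List.getD_eq_getElem?_getD, List.getElem?_drop] using this
        have hlen2 : 2 * c + 1 < row.length := by
          have := congrArg List.length hrow
          simp [List.length_drop, hrest] at this; omega
        -- one step of A at odd index 2*c+1
        rw [hks, bLoop]
        simp only [if_pos hlen1, if_pos hlen2, hx, hy]
        by_cases hlast : c + 1 < ks.length
        · -- category advances, no break
          rw [aLoop_odd_step ks _ _ y rest2 c _ _ (by omega) (by omega)]
          have hdrop2 : rest2 = row.drop (2 * (c + 1)) := by
            have h2 : (row.drop (2 * c)).drop 2 = row.drop (2 * c + 2) := by
              rw [List.drop_drop]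
            rw [hrow, hrest] at h2
            simp only [List.drop_succ_cons, List.drop_zero] at h2
            rw [h2]; ring_nf
          have := ih (c + 1) (dset (dset tpl (ks.getD c "") "mark" x) (ks.getD c "") "comments" y) (by omega) hlast
          rw [hdrop2]
          simpa using this
        · -- last category: A breaks, B's remaining key list is empty
          rw [aLoop_odd_break ks _ _ y rest2 c _ _ (by omega) (by omega)]
          have hnil : ks.drop (c + 1) = [] := List.drop_eq_nil_iff.mpr (by omega)
          rw [hnil, bLoop]

-- ===== VERDICT (by name: the statement is the Claim_ definition above) =====
theorem populate_marks_comments_individual_spec : Claim_equal_populate_marks_comments_individual := by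
  intro row tpl _ hpre
  unfold Spec_populate_marks_comments_individual
  unfold populate_marks_comments_individual populate_marks_comments_individual_alt
  cases htpl : tpl with
  | nil => exact absurd htpl hpre
  | cons p rest =>
    simp only [List.map_cons]
    have h := main_inv (tpl.map (·.1)) row (tpl.map (·.1)).length 0
      tpl (by omega) (by simp [htpl])
    simp only [Nat.mul_zero, List.drop_zero, htpl, List.map_cons] at h
    have hgd : (p.1 :: rest.map (·.1)).getD 0 "" = p.1 := rfl
    rw [hgd] at h
    exact h
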